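-- pv_equiv track=rewrite | github.com/onlyxool/x2caffe | pto2caffe/pytorch2caffe/op/expression.py | compute_scale_axis
-- ===== SOURCE A (Python) =====
-- def compute_scale_axis(bottom_shape, scale_shape):
--     if not isinstance(bottom_shape, list) and not isinstance(bottom_shape, tuple):
--         raise NotImplementedError
--
--     if len(bottom_shape) > 4 or len(bottom_shape) < 2:
--         raise NotImplementedError
--
--     bottom_map = \
--     [[bottom_shape[:1], bottom_shape[:2], bottom_shape[:3], bottom_shape[:4]],
--                        [bottom_shape[1:2], bottom_shape[1:3], bottom_shape[1:4]],
--                                           [bottom_shape[2:3], bottom_shape[2:4]],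
--                                                              [bottom_shape[3:4]]]
--     for no, line in enumerate(bottom_map):
--         for colum in line:
--             if colum == scale_shape:
--                 return no
-- ===== SOURCE B (Python) =====
-- def compute_scale_axis(bottom_shape, scale_shape):
--     if not scale_shape:
--         return None
--     L = len(scale_shape)
--     for no in range(len(bottom_shape)):
--         if bottom_shape[no:no + L] == scale_shape:
--             return no
--     return None
-- ===== Notes on version B (the rewrite author's own statement) =====
-- stated objective: simpler
-- what changed: Replaces the hard-coded 4x4 triangular table of all slices with a single pass that tests, for each start index, the one slice whose length equals len(scale_shape).
-- intended difference: On an empty scale_shape with len(bottom_shape) < 4, A returns len(bottom_shape) because an empty trailing slice in its table accidentally equals [], while B returns None since an empty shape names no axis, which is the intended behaviour (A itself returns None for empty scale_shape when len(bottom_shape) == 4). — e.g. on compute_scale_axis([1, 2], []): A returns some 2, B returns none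
import Mathlib
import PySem

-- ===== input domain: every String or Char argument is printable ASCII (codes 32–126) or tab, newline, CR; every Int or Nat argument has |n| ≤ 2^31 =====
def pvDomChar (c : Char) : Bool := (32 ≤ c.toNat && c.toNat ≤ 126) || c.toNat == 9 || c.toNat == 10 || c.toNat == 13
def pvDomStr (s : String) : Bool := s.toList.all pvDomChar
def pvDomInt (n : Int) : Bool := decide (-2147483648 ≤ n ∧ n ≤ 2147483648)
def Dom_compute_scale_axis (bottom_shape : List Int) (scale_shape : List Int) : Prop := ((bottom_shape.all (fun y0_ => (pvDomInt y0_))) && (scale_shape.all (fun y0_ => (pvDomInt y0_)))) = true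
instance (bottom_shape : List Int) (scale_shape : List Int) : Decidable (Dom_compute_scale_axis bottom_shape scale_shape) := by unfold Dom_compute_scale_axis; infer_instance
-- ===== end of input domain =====

-- B replaces A's hard-coded triangular table of all slices by a single pass testing one
-- length-matched slice per start index (objective: simpler); B differs intentionally on
-- empty scale_shape (see D_ below).

-- ===== PORT A =====
-- the outer enumerate loop: first row (index no) containing scale_shape wins
def csaA_loop (scale_shape : List Int) (no : Int) : List (List (List Int)) → Option Int
  | [] => none
  | line :: rest =>
    if scale_shape ∈ line then some no else csaA_loop scale_shape (no + 1) rest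

def compute_scale_axis (bottom_shape : List Int) (scale_shape : List Int) : Option Int :=
  let bottom_map : List (List (List Int)) :=
    [[PySem.List.slice bottom_shape none (some 1), PySem.List.slice bottom_shape none (some 2),
      PySem.List.slice bottom_shape none (some 3), PySem.List.slice bottom_shape none (some 4)],
     [PySem.List.slice bottom_shape (some 1) (some 2), PySem.List.slice bottom_shape (some 1) (some 3),
      PySem.List.slice bottom_shape (some 1) (some 4)],
     [PySem.List.slice bottom_shape (some 2) (some 3), PySem.List.slice bottom_shape (some 2) (some 4)],
     [PySem.List.slice bottom_shape (some 3) (some 4)]]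
  csaA_loop scale_shape 0 bottom_map

-- ===== PORT B =====
-- the for-no-in-range loop of Source B
def csaB_loop (bottom_shape scale_shape : List Int) (L : Int) : List Int → Option Int
  | [] => none
  | no :: rest =>
    if PySem.List.slice bottom_shape (some no) (some (no + L)) = scale_shape then some no
    else csaB_loop bottom_shape scale_shape L rest

def compute_scale_axis_alt (bottom_shape : List Int) (scale_shape : List Int) : Option Int :=
  if scale_shape = [] then none
  else
    csaB_loop bottom_shape scale_shape (scale_shape.length : Int)
      (PySem.List.pyRange 0 (bottom_shape.length : Int) 1)

-- ===== PRECONDITION & SPEC =====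
-- A raises NotImplementedError unless 2 <= len(bottom_shape) <= 4.
def Pre_compute_scale_axis (bottom_shape : List Int) (scale_shape : List Int) : Prop :=
  2 ≤ bottom_shape.length ∧ bottom_shape.length ≤ 4

instance (bottom_shape : List Int) (scale_shape : List Int) : Decidable (Pre_compute_scale_axis bottom_shape scale_shape) := by unfold Pre_compute_scale_axis; infer_instance

def pvWitness_compute_scale_axis : List Int × List Int := ([1, 2, 3], [2, 3])

-- On empty scale_shape with len(bottom_shape) < 4, A returns len(bottom_shape) because an empty
-- trailing slice of its table accidentally equals []; B returns none, the intended value, since an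
-- empty shape names no axis (A itself returns none for empty scale_shape when len(bottom_shape) = 4).
def D_compute_scale_axis (bottom_shape : List Int) (scale_shape : List Int) : Prop :=
  scale_shape = [] ∧ bottom_shape.length < 4

instance (bottom_shape : List Int) (scale_shape : List Int) : Decidable (D_compute_scale_axis bottom_shape scale_shape) := by unfold D_compute_scale_axis; infer_instance

def Spec_compute_scale_axis (bottom_shape : List Int) (scale_shape : List Int) (out : Option Int) : Prop := ¬ D_compute_scale_axis bottom_shape scale_shape → out = compute_scale_axis_alt bottom_shape scale_shape
instance (bottom_shape : List Int) (scale_shape : List Int) (out : Option Int) : Decidable (Spec_compute_scale_axis bottom_shape scale_shape out) := by unfold Spec_compute_scale_axis; infer_instance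

def pvDiffWitness_compute_scale_axis : List Int × List Int := ([1, 2], [])
def pvDiffWitnessOut_compute_scale_axis : (Option Int) × (Option Int) := (some 2, none)

-- ===== CLAIM (what is proved, stated in full; the proofs are below) =====
def Claim_unchanged_compute_scale_axis : Prop := ∀ (bottom_shape : List Int) (scale_shape : List Int), Dom_compute_scale_axis bottom_shape scale_shape → Pre_compute_scale_axis bottom_shape scale_shape → Spec_compute_scale_axis bottom_shape scale_shape (compute_scale_axis bottom_shape scale_shape)
def Claim_changed_compute_scale_axis : Prop := Dom_compute_scale_axis (pvDiffWitness_compute_scale_axis.1) (pvDiffWitness_compute_scale_axis.2) ∧ Pre_compute_scale_axis (pvDiffWitness_compute_scale_axis.1) (pvDiffWitness_compute_scale_axis.2) ∧ D_compute_scale_axis (pvDiffWitness_compute_scale_axis.1) (pvDiffWitness_compute_scale_axis.2) ∧ compute_scale_axis (pvDiffWitness_compute_scale_axis.1) (pvDiffWitness_compute_scale_axis.2) = pvDiffWitnessOut_compute_scale_axis.1 ∧ compute_scale_axis_alt (pvDiffWitness_compute_scale_axis.1) (pvDiffWitness_compute_scale_axis.2) = pvDiffWitnessOut_compute_scale_axis.2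 ∧ pvDiffWitnessOut_compute_scale_axis.1 ≠ pvDiffWitnessOut_compute_scale_axis.2
def Claim_exact_compute_scale_axis : Prop := ∀ (bottom_shape : List Int) (scale_shape : List Int), Dom_compute_scale_axis bottom_shape scale_shape → Pre_compute_scale_axis bottom_shape scale_shape → D_compute_scale_axis bottom_shape scale_shape → compute_scale_axis bottom_shape scale_shape ≠ compute_scale_axis_alt bottom_shape scale_shape

-- ===== LEMMAS AND PROOFS =====

theorem csa_len_slice_le {xs : List Int} (a b : Option Int) :
    (PySem.List.slice xs a b).length ≤ xs.length := by
  unfold PySem.List.slice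
  split <;> simp

theorem csaA_none_of_long (bs ss : List Int) (h : bs.length < ss.length) :
    compute_scale_axis bs ss = none := by
  have hne : ∀ (o1 o2 : Option Int), ¬ ss = PySem.List.slice bs o1 o2 := fun o1 o2 hc =>
    absurd (csa_len_slice_le o1 o2) (by rw [← hc]; omega)
  simp [compute_scale_axis, csaA_loop, hne]

theorem csaB_loop_none_of_long (bs ss : List Int) (L : Int) (h : bs.length < ss.length)
    (r : List Int) : csaB_loop bs ss L r = none := by
  have hne : ∀ (o1 o2 : Option Int), ¬ PySem.List.slice bs o1 o2 = ss := fun o1 o2 hc =>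
    absurd (csa_len_slice_le o1 o2) (by rw [hc]; omega)
  induction r with
  | nil => rfl
  | cons no rest ih => simp [csaB_loop, hne, ih]

theorem csaB_none_of_long (bs ss : List Int) (h : bs.length < ss.length) :
    compute_scale_axis_alt bs ss = none := by
  unfold compute_scale_axis_alt
  split
  · rfl
  · exact csaB_loop_none_of_long bs ss _ h _

set_option maxHeartbeats 1600000 in
theorem csa_unchanged : ∀ (bottom_shape : List Int) (scale_shape : List Int), Pre_compute_scale_axis bottom_shape scale_shape → ¬ D_compute_scale_axis bottom_shape scale_shape → compute_scale_axis bottom_shape scale_shape = compute_scale_axis_alt bottom_shape scale_shape := by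
  have hr2 : PySem.List.pyRange 0 (((2:Nat)):Int) 1 = [0,1] := by decide
  have hr3 : PySem.List.pyRange 0 (((3:Nat)):Int) 1 = [0,1,2] := by decide
  have hr4 : PySem.List.pyRange 0 (((4:Nat)):Int) 1 = [0,1,2,3] := by decide
  intro bs ss hpre hnd
  unfold Pre_compute_scale_axis at hpre
  unfold D_compute_scale_axis at hnd
  rcases bs with _ | ⟨a, _ | ⟨b, _ | ⟨c, _ | ⟨d, _ | ⟨e, t⟩⟩⟩⟩⟩ <;>
    simp only [List.length_nil, List.length_cons] at hpre <;> try omega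
  -- bottom_shape = [a, b]
  · rcases ss with _ | ⟨x, _ | ⟨y, ss'⟩⟩
    · exact absurd ⟨rfl, by simp⟩ hnd
    · simp only [compute_scale_axis, compute_scale_axis_alt, csaA_loop,
        List.length_cons, List.length_nil, Nat.zero_add]
      norm_num [hr2, pysem]
      split_ifs <;> simp_all [csaB_loop, PySem.List.slice] <;>
        first | omega | (split_ifs <;> simp_all <;> omega)
    · rcases ss' with _ | ⟨z, ss''⟩
      · simp only [compute_scale_axis, compute_scale_axis_alt, csaA_loop,
          List.length_cons, List.length_nil, Nat.zero_add]
        norm_num [hr2, pysem]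
        split_ifs <;> simp_all [csaB_loop, PySem.List.slice] <;>
        first | omega | (split_ifs <;> simp_all <;> omega)
      · rw [csaA_none_of_long _ _ (by simp only [List.length_cons, List.length_nil]; omega), csaB_none_of_long _ _ (by simp only [List.length_cons, List.length_nil]; omega)]
  -- bottom_shape = [a, b, c]
  · rcases ss with _ | ⟨x, _ | ⟨y, _ | ⟨z, ss'⟩⟩⟩
    · exact absurd ⟨rfl, by simp⟩ hnd
    · simp only [compute_scale_axis, compute_scale_axis_alt, csaA_loop,
        List.length_cons, List.length_nil, Nat.zero_add]
      norm_num [hr3, pysem]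
      split_ifs <;> simp_all [csaB_loop, PySem.List.slice] <;>
        first | omega | (split_ifs <;> simp_all <;> omega)
    · simp only [compute_scale_axis, compute_scale_axis_alt, csaA_loop,
        List.length_cons, List.length_nil, Nat.zero_add]
      norm_num [hr3, pysem]
      split_ifs <;> simp_all [csaB_loop, PySem.List.slice] <;>
        first | omega | (split_ifs <;> simp_all <;> omega)
    · rcases ss' with _ | ⟨w, ss''⟩
      · simp only [compute_scale_axis, compute_scale_axis_alt, csaA_loop,
          List.length_cons, List.length_nil, Nat.zero_add]
        norm_num [hr3, pysem]
        split_ifs <;> simp_all [csaB_loop, PySem.List.slice] <;>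
        first | omega | (split_ifs <;> simp_all <;> omega)
      · rw [csaA_none_of_long _ _ (by simp only [List.length_cons, List.length_nil]; omega), csaB_none_of_long _ _ (by simp only [List.length_cons, List.length_nil]; omega)]
  -- bottom_shape = [a, b, c, d]
  · rcases ss with _ | ⟨x, _ | ⟨y, _ | ⟨z, _ | ⟨w, ss'⟩⟩⟩⟩
    · simp only [compute_scale_axis, compute_scale_axis_alt, csaA_loop,
        List.length_cons, List.length_nil, Nat.zero_add]
      norm_num [hr4, pysem]
      simp
    · simp only [compute_scale_axis, compute_scale_axis_alt, csaA_loop,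
        List.length_cons, List.length_nil, Nat.zero_add]
      norm_num [hr4, pysem]
      split_ifs <;> simp_all [csaB_loop, PySem.List.slice] <;>
        first | omega | (split_ifs <;> simp_all <;> omega)
    · simp only [compute_scale_axis, compute_scale_axis_alt, csaA_loop,
        List.length_cons, List.length_nil, Nat.zero_add]
      norm_num [hr4, pysem]
      split_ifs <;> simp_all [csaB_loop, PySem.List.slice] <;>
        first | omega | (split_ifs <;> simp_all <;> omega)
    · simp only [compute_scale_axis, compute_scale_axis_alt, csaA_loop,
        List.length_cons, List.length_nil, Nat.zero_add]
      norm_num [hr4, pysem]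
      split_ifs <;> simp_all [csaB_loop, PySem.List.slice] <;>
        first | omega | (split_ifs <;> simp_all <;> omega)
    · rcases ss' with _ | ⟨v, ss''⟩
      · simp only [compute_scale_axis, compute_scale_axis_alt, csaA_loop,
          List.length_cons, List.length_nil, Nat.zero_add]
        norm_num [hr4, pysem]
        split_ifs <;> simp_all [csaB_loop, PySem.List.slice] <;>
        first | omega | (split_ifs <;> simp_all <;> omega)
      · rw [csaA_none_of_long _ _ (by simp only [List.length_cons, List.length_nil]; omega), csaB_none_of_long _ _ (by simp only [List.length_cons, List.length_nil]; omega)]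

-- ===== VERDICT (by name: the statement is the Claim_ definition above) =====
theorem compute_scale_axis_spec : Claim_unchanged_compute_scale_axis := by
  intro bs ss _ hpre hnd
  exact csa_unchanged bs ss hpre hnd

theorem compute_scale_axis_changed : Claim_changed_compute_scale_axis := by
  unfold Claim_changed_compute_scale_axis; decide

theorem compute_scale_axis_tight : Claim_exact_compute_scale_axis := by
  intro bs ss _ hpre hd
  obtain ⟨rfl, hlen⟩ := hd
  unfold Pre_compute_scale_axis at hpre
  rcases bs with _ | ⟨a, _ | ⟨b, _ | ⟨c, _ | ⟨d, t⟩⟩⟩⟩ <;>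
    simp only [List.length_nil, List.length_cons] at hpre hlen <;> try omega
  · norm_num [compute_scale_axis, compute_scale_axis_alt, csaA_loop, pysem]
    simp
  · norm_num [compute_scale_axis, compute_scale_axis_alt, csaA_loop, pysem]
    simp
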